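-- pv_equiv track=rewrite | github.com/Henry-Linn/ECE590CN_QKD | simulation.py | construct_partition_connectivity
-- ===== SOURCE A (Python) =====
-- GSs_indices = [0,1]
--
-- LEOs_indices = [2,3]
--
-- GEOs_indices = [4]
--
-- def construct_partition_connectivity(set_indcies):
--   GSs = []
--   LEOs = []
--   GEOs = []
--   for index in set_indcies:
--     if index in GSs_indices:
--       GSs.append(index)
--     elif index in LEOs_indices:
--       LEOs.append(index)
--     elif index in GEOs_indices:
--       GEOs.append(index)
--   return GSs, LEOs, GEOs
-- ===== SOURCE B (Python) =====
-- GSs_indices = [0,1]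
--
-- LEOs_indices = [2,3]
--
-- GEOs_indices = [4]
--
-- def construct_partition_connectivity(set_indcies):
--   GSs = [i for i in set_indcies if i in GSs_indices]
--   LEOs = [i for i in set_indcies if i in LEOs_indices]
--   GEOs = [i for i in set_indcies if i in GEOs_indices]
--   return GSs, LEOs, GEOs
-- ===== Notes on version B (the rewrite author's own statement) =====
-- stated objective: simpler
-- what changed: Replaced the single accumulator loop with an elif chain by three independent filter comprehensions, one per group, relying on the disjointness of the three constant index lists.
import Mathlib
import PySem

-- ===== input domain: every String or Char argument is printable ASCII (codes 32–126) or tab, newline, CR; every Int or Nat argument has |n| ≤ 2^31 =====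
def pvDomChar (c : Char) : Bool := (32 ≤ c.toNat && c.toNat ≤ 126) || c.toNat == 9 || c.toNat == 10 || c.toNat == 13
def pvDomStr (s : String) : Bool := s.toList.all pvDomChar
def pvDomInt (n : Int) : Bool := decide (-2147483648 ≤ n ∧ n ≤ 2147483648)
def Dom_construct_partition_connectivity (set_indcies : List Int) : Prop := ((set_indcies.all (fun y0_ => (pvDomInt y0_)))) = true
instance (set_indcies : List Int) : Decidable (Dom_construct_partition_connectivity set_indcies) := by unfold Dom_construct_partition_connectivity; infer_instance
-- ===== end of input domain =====

-- B replaces A's single accumulator loop (elif chain) by three independent membership filters; objective: simpler.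

-- module-level constants shared by both Pythons
def GSs_indices : List Int := [0, 1]
def LEOs_indices : List Int := [2, 3]
def GEOs_indices : List Int := [4]

-- ===== PORT A =====
-- A: one pass with three accumulators and an elif chain
def construct_partition_connectivity (set_indcies : List Int) : List Int × List Int × List Int :=
  let st := set_indcies.foldl
    (fun (st : List Int × List Int × List Int) index =>
      if index ∈ GSs_indices then (st.1 ++ [index], st.2.1, st.2.2)
      else if index ∈ LEOs_indices then (st.1, st.2.1 ++ [index], st.2.2)
      else if index ∈ GEOs_indices then (st.1, st.2.1, st.2.2 ++ [index])
      else st)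
    ([], [], [])
  (st.1, st.2.1, st.2.2)

-- ===== PORT B =====
-- B: three independent filter passes (the list comprehensions of Source B)
def construct_partition_connectivity_alt (set_indcies : List Int) : List Int × List Int × List Int :=
  (set_indcies.filter (fun i => i ∈ GSs_indices),
   set_indcies.filter (fun i => i ∈ LEOs_indices),
   set_indcies.filter (fun i => i ∈ GEOs_indices))

-- ===== PRECONDITION & SPEC =====
def Spec_construct_partition_connectivity (set_indcies : List Int) (out : List Int × List Int × List Int) : Prop := out = construct_partition_connectivity_alt set_indcies
instance (set_indcies : List Int) (out : List Int × List Int × List Int) : Decidable (Spec_construct_partition_connectivity set_indcies out) := by unfold Spec_construct_partition_connectivity; infer_instance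

-- ===== CLAIM (what is proved, stated in full; the proofs are below) =====
def Claim_equal_construct_partition_connectivity : Prop := ∀ (set_indcies : List Int), Dom_construct_partition_connectivity set_indcies → Spec_construct_partition_connectivity set_indcies (construct_partition_connectivity set_indcies)

-- ===== LEMMAS AND PROOFS =====

-- loop invariant: A's fold appends exactly the three filters to the accumulators
theorem pv_fold_inv (xs : List Int) (a b c : List Int) :
    xs.foldl
      (fun (st : List Int × List Int × List Int) index =>
        if index ∈ GSs_indices then (st.1 ++ [index], st.2.1, st.2.2)
        else if index ∈ LEOs_indices then (st.1, st.2.1 ++ [index], st.2.2)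
        else if index ∈ GEOs_indices then (st.1, st.2.1, st.2.2 ++ [index])
        else st)
      (a, b, c)
    = (a ++ xs.filter (fun i => i ∈ GSs_indices),
       b ++ xs.filter (fun i => i ∈ LEOs_indices),
       c ++ xs.filter (fun i => i ∈ GEOs_indices)) := by
  induction xs generalizing a b c with
  | nil => simp
  | cons x xs ih =>
    simp only [List.foldl_cons, List.filter_cons]
    by_cases h1 : x ∈ GSs_indices
    · have h2 : x ∉ LEOs_indices := by
        simp [GSs_indices, LEOs_indices] at h1 ⊢; omega
      have h3 : x ∉ GEOs_indices := by
        simp [GSs_indices, GEOs_indices] at h1 ⊢; omega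
      simp [h1, h2, h3, ih]
    · by_cases h2 : x ∈ LEOs_indices
      · have h3 : x ∉ GEOs_indices := by
          simp [LEOs_indices, GEOs_indices] at h2 ⊢; omega
        simp [h1, h2, h3, ih]
      · by_cases h3 : x ∈ GEOs_indices
        · simp [h1, h2, h3, ih]
        · simp [h1, h2, h3, ih]

-- ===== VERDICT (by name: the statement is the Claim_ definition above) =====
theorem construct_partition_connectivity_spec : Claim_equal_construct_partition_connectivity := by
  intro xs _
  unfold Spec_construct_partition_connectivity construct_partition_connectivity construct_partition_connectivity_alt
  simp [pv_fold_inv]
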